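-- pv_equiv track=rewrite | github.com/bashbash96/InterviewPreparation | LeetCode/questions.py | getPivotIdx
-- ===== SOURCE A (Python) =====
-- def getPivotIdx(nums):
--     start, end = 0, len(nums) - 1
--
--     while start < end:
--         mid = (start + end) // 2
--
--         if nums[mid] > nums[mid + 1]:
--             return mid
--         elif nums[mid] >= nums[start]:
--             start = mid + 1
--         else:
--             end = mid
--
--     return -1
-- ===== SOURCE B (Python) =====
-- def getPivotIdx(nums):
--     # Recurse on the actual sublist window (with an offset for absolute
--     # indices) instead of index arithmetic on the full array.
--     def go(xs, off):
--         if len(xs) <= 1: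
--             return -1
--         r = (len(xs) - 1) // 2
--         if xs[r] > xs[r + 1]:
--             return off + r
--         if xs[r] >= xs[0]:
--             return go(xs[r + 1:], off + r + 1)
--         return go(xs[:r + 1], off)
--     return go(nums, 0)
-- ===== Notes on version B (the rewrite author's own statement) =====
-- stated objective: alternative
-- what changed: A's iterative index-window binary search over the full array is replaced by recursion on explicit sublists: each step slices the list (xs[r+1:] or xs[:r+1]) and carries an offset, with the probe positions computed from the sublist length instead of start/end indices.
import Mathlib
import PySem

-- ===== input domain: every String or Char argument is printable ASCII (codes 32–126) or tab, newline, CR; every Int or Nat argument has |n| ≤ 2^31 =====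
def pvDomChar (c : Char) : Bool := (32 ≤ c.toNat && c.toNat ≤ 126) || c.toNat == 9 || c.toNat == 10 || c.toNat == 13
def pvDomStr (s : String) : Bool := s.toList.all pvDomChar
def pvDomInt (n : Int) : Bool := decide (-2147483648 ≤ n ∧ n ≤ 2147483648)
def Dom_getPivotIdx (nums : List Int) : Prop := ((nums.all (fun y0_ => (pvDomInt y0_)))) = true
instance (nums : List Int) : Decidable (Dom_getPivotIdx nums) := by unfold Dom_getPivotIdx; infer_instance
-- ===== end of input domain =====

-- B replaces A's index-arithmetic while-loop by recursion on explicit sublists (python slices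
-- xs[r+1:] / xs[:r+1]) carrying an offset; same results, a different decomposition (no speed claim).

-- ===== PORT A =====
-- the while-loop of A, with its mutable start/end as the recursion state
def getPivotIdxLoop (nums : List Int) (start stop : Int) : Int :=
  if _h : start < stop then
    let mid := PySem.Int.floordiv (start + stop) 2
    if PySem.List.pyGetD nums mid 0 > PySem.List.pyGetD nums (mid + 1) 0 then mid
    else if PySem.List.pyGetD nums mid 0 ≥ PySem.List.pyGetD nums start 0 then
      getPivotIdxLoop nums (mid + 1) stop
    else
      getPivotIdxLoop nums start mid
  else (-1 : Int)
termination_by (stop - start).toNat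
decreasing_by
  · have := PySem.Int.floordiv_eq_ediv_of_pos (a := start + stop) (b := 2) (by omega)
    simp only [mid, this] at *; omega
  · have := PySem.Int.floordiv_eq_ediv_of_pos (a := start + stop) (b := 2) (by omega)
    simp only [mid, this] at *; omega

def getPivotIdx (nums : List Int) : Int :=
  getPivotIdxLoop nums 0 ((nums.length : Int) - 1)

-- ===== PORT B =====
-- Source B's inner go(xs, off): recursion on the sublist itself.  The probes xs[r], xs[r+1], xs[0]
-- have provably in-range nonnegative indices, so List.getD is exact for them; the slices
-- xs[r+1:] and xs[:r+1] are List.drop / List.take (exact for nonnegative bounds,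
-- PySem.List.slice_from_natCast / slice_to_natCast).
def getPivotIdxGo (xs : List Int) (off : Nat) : Int :=
  if xs.length ≤ 1 then (-1 : Int)
  else
    let r := (xs.length - 1) / 2
    if xs.getD r 0 > xs.getD (r + 1) 0 then ((off + r : Nat) : Int)
    else if xs.getD r 0 ≥ xs.getD 0 0 then getPivotIdxGo (xs.drop (r + 1)) (off + r + 1)
    else getPivotIdxGo (xs.take (r + 1)) off
termination_by xs.length
decreasing_by
  · simp only [List.length_drop]; omega
  · simp only [List.length_take]; omega

def getPivotIdx_alt (nums : List Int) : Int :=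
  getPivotIdxGo nums 0

-- ===== PRECONDITION & SPEC =====
def Spec_getPivotIdx (nums : List Int) (out : Int) : Prop := out = getPivotIdx_alt nums
instance (nums : List Int) (out : Int) : Decidable (Spec_getPivotIdx nums out) := by unfold Spec_getPivotIdx; infer_instance

-- ===== CLAIM (what is proved, stated in full; the proofs are below) =====
def Claim_equal_getPivotIdx : Prop := ∀ (nums : List Int), Dom_getPivotIdx nums → Spec_getPivotIdx nums (getPivotIdx nums)

-- ===== LEMMAS AND PROOFS =====

theorem getD_drop_take (nums : List Int) (s t k : Nat) (hk : k < t) :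
    ((nums.drop s).take t).getD k (0:Int) = nums.getD (s + k) 0 := by
  simp [List.getD_eq_getElem?_getD, hk, List.getElem?_drop]

theorem getPivotIdxLoop_eq_go (nums : List Int) (n : Nat) :
    ∀ s e : Int, 0 ≤ s → e ≤ (nums.length : Int) - 1 → (e - s).toNat = n →
      getPivotIdxLoop nums s e =
        getPivotIdxGo ((nums.drop s.toNat).take (e - s + 1).toNat) s.toNat := by
  induction n using Nat.strong_induction_on with
  | _ n ih =>
    intro s e hs he hn
    set xs : List Int := (nums.drop s.toNat).take (e - s + 1).toNat with hxs
    by_cases h : s < e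
    · -- window has length e - s + 1 ≥ 2
      have hlen : xs.length = (e - s + 1).toNat := by
        simp only [hxs, List.length_take, List.length_drop]; omega
      have hmid : PySem.Int.floordiv (s + e) 2 = s + ((e - s).toNat / 2 : Nat) := by
        rw [PySem.Int.floordiv_eq_ediv_of_pos (by omega)]; omega
      have hgr : (xs.length - 1) / 2 = (e - s).toNat / 2 := by omega
      have hq : (e - s).toNat / 2 < (e - s).toNat := by omega
      have hA1 : PySem.List.pyGetD nums (s + ((e - s).toNat / 2 : Nat)) 0
          = xs.getD ((e - s).toNat / 2) 0 := by
        have hc : s + ((e - s).toNat / 2 : Nat) = ((s.toNat + (e - s).toNat / 2 : Nat) : Int) := by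
          omega
        rw [hc, PySem.List.pyGetD_natCast, hxs, getD_drop_take _ _ _ _ (by omega)]
      have hA2 : PySem.List.pyGetD nums (s + ((e - s).toNat / 2 : Nat) + 1) 0
          = xs.getD ((e - s).toNat / 2 + 1) 0 := by
        have hc : s + ((e - s).toNat / 2 : Nat) + 1
            = ((s.toNat + ((e - s).toNat / 2 + 1) : Nat) : Int) := by omega
        rw [hc, PySem.List.pyGetD_natCast, hxs, getD_drop_take _ _ _ _ (by omega)]
      have hA0 : PySem.List.pyGetD nums s 0 = xs.getD 0 0 := by
        have hc : s = ((s.toNat + 0 : Nat) : Int) := by omega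
        rw [hc, PySem.List.pyGetD_natCast, hxs, getD_drop_take _ _ _ _ (by omega)]
      conv_lhs => rw [getPivotIdxLoop, dif_pos h]
      conv_lhs => simp only [hmid, hA1, hA2, hA0]
      conv_rhs => rw [getPivotIdxGo, if_neg (show ¬ xs.length ≤ 1 by omega)]
      conv_rhs => simp only [hgr]
      split
      · omega
      · split
        · -- right half: start := mid + 1
          rw [ih ((e - (s + ((e - s).toNat / 2 : Nat) + 1)).toNat) (by omega)
              (s + ((e - s).toNat / 2 : Nat) + 1) e (by omega) he rfl]
          congr 1
          · rw [hxs, List.drop_take, List.drop_drop]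
            have h1 : (e - (s + ((e - s).toNat / 2 : Nat) + 1) + 1).toNat
                = (e - s + 1).toNat - ((e - s).toNat / 2 + 1) := by omega
            have h2 : (s + ((e - s).toNat / 2 : Nat) + 1).toNat
                = s.toNat + ((e - s).toNat / 2 + 1) := by omega
            rw [h1, h2]
          · omega
        · -- left half: end := mid
          rw [ih ((s + ((e - s).toNat / 2 : Nat) - s)).toNat (by omega)
              s (s + ((e - s).toNat / 2 : Nat)) hs (by omega) rfl]
          rw [hxs, List.take_take]
          have h3 : (s + ((e - s).toNat / 2 : Nat) - s + 1).toNat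
              = min ((e - s).toNat / 2 + 1) (e - s + 1).toNat := by omega
          rw [h3]
    · -- base: window length ≤ 1
      rw [getPivotIdxLoop, dif_neg h, getPivotIdxGo, if_pos]
      simp only [hxs, List.length_take, List.length_drop]; omega

-- ===== VERDICT (by name: the statement is the Claim_ definition above) =====
theorem getPivotIdx_spec : Claim_equal_getPivotIdx := by
  intro nums _
  unfold Spec_getPivotIdx getPivotIdx getPivotIdx_alt
  rw [getPivotIdxLoop_eq_go nums ((nums.length : Int) - 1 - 0).toNat 0 _ (by omega) (by omega) rfl]
  congr 1
  simp only [Int.toNat_zero, List.drop_zero]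
  rw [List.take_of_length_le]
  omega
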